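-- pv_equiv track=rewrite | github.com/vksychev/PythonPlayground | Algorithms/venv/include/Points.py | matchingPoint
-- ===== SOURCE A (Python) =====
-- def matchingPoint(r, v):
--     all = 0
--     match = 0
--     for i in v[0]:
--         x = range(i[0] - 15, i[0] + 15)
--         y = range(i[1] - 15, i[1] + 15)
--         all += 1
--         for j in r[0]:
--             if j[0] in x and j[1] in y:
--                 match += 1
--                 break
--     for i in v[1]:
--         x = range(i[0] - 15, i[0] + 15)
--         y = range(i[1] - 15, i[1] + 15)
--         all += 1
--         for j in r[1]:
--             if j[0] in x and j[1] in y: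
--                 match += 1
--                 break
--
--     return (match, all)
-- ===== SOURCE B (Python) =====
-- def matchingPoint(r, v):
--     # Spatial-grid re-implementation: bucket r-points into 15x15 cells once per
--     # channel, then each v-point only inspects the <=9 neighbouring cells.
--     m = 0
--     a = 0
--     for k in (0, 1):
--         vs = v[k]
--         a += len(vs)
--         if not vs:
--             continue
--         grid = {}
--         for (x, y) in r[k]:
--             grid.setdefault((x // 15, y // 15), []).append((x, y))
--         for (px, py) in vs:
--             found = False
--             for cx in range((px - 15) // 15, (px + 14) // 15 + 1):
--                 for cy in range((py - 15) // 15, (py + 14) // 15 + 1):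
--                     for (x, y) in grid.get((cx, cy), ()):
--                         if px - 15 <= x <= px + 14 and py - 15 <= y <= py + 14:
--                             found = True
--                             break
--                     if found:
--                         break
--                 if found:
--                     break
--             if found:
--                 m += 1
--     return (m, a)
-- ===== Notes on version B (the rewrite author's own statement) =====
-- stated objective: faster
-- what changed: Replaces A's per-v-point linear scan of the whole r-channel with a spatial hash grid of 15x15 cells built once per channel, so each v-point probes at most 9 buckets.
import Mathlib
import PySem

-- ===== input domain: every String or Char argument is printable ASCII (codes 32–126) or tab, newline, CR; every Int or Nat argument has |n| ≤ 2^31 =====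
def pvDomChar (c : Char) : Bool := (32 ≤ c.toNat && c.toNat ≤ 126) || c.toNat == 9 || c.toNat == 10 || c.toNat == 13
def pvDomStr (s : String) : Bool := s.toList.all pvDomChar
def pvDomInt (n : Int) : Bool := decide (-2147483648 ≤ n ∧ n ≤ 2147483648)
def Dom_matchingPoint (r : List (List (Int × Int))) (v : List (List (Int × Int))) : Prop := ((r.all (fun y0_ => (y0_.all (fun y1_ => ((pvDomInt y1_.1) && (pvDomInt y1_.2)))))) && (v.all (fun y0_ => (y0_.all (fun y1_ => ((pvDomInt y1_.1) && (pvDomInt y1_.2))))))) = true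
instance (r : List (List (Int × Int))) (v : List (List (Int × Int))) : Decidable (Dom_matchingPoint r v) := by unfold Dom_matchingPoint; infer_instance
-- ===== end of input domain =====

-- B buckets the r-points of each channel into a 15x15 spatial grid and probes only
-- the ≤9 neighbouring cells per v-point, replacing A's scan of the whole r-channel
-- per v-point (objective: faster by this asymptotic mechanism; a timing run could
-- not measure a difference at the generated sizes).


-- ===== PORT A =====
-- inner 'for j in r[k]: if j[0] in x and j[1] in y: match += 1; break'
-- ('j0 in range(a, b)' ported exactly as a ≤ j0 ∧ j0 < b, the step-1 range membership)
def pvInnerA (i : Int × Int) : List (Int × Int) → Int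
  | [] => 0
  | j :: rest =>
      if (i.1 - 15 ≤ j.1 ∧ j.1 < i.1 + 15) ∧ (i.2 - 15 ≤ j.2 ∧ j.2 < i.2 + 15) then 1
      else pvInnerA i rest

-- one outer loop of A; state is (match, all)
def pvLoopA (rs : List (Int × Int)) (st : Int × Int) (vs : List (Int × Int)) : Int × Int :=
  vs.foldl (fun st i => (st.1 + pvInnerA i rs, st.2 + 1)) st

def matchingPoint (r : List (List (Int × Int))) (v : List (List (Int × Int))) : Int × Int :=
  let st := pvLoopA ((PySem.List.pyGet? r 0).getD []) (0, 0) ((PySem.List.pyGet? v 0).getD [])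
  pvLoopA ((PySem.List.pyGet? r 1).getD []) st ((PySem.List.pyGet? v 1).getD [])

-- ===== PORT B =====
def pvCell (j : Int × Int) : Int × Int := (PySem.Int.floordiv j.1 15, PySem.Int.floordiv j.2 15)

-- grid.setdefault((x//15, y//15), []).append((x, y)) over r[k]
def pvGrid (rs : List (Int × Int)) : PySem.Dict (Int × Int) (List (Int × Int)) :=
  rs.foldl (fun g j => g.modify (pvCell j) [] (fun l => l ++ [j])) PySem.Dict.empty

def pvInBox (p j : Int × Int) : Bool :=
  decide (p.1 - 15 ≤ j.1 ∧ j.1 ≤ p.1 + 14 ∧ p.2 - 15 ≤ j.2 ∧ j.2 ≤ p.2 + 14)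

-- the break-search over the ≤9 neighbouring cells
def pvFound (g : PySem.Dict (Int × Int) (List (Int × Int))) (p : Int × Int) : Bool :=
  (PySem.List.pyRange (PySem.Int.floordiv (p.1 - 15) 15) (PySem.Int.floordiv (p.1 + 14) 15 + 1) 1).any fun cx =>
    (PySem.List.pyRange (PySem.Int.floordiv (p.2 - 15) 15) (PySem.Int.floordiv (p.2 + 14) 15 + 1) 1).any fun cy =>
      (g.getD (cx, cy) []).any (pvInBox p)

-- one channel of B: skip empty vs (continue), else build the grid and count
def pvChannelB (rs : List (Int × Int)) (vs : List (Int × Int)) : Int :=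
  if vs = [] then 0
  else
    let g := pvGrid rs
    vs.foldl (fun m p => if pvFound g p then m + 1 else m) 0

def matchingPoint_alt (r : List (List (Int × Int))) (v : List (List (Int × Int))) : Int × Int :=
  let v0 := (PySem.List.pyGet? v 0).getD []
  let v1 := (PySem.List.pyGet? v 1).getD []
  (pvChannelB ((PySem.List.pyGet? r 0).getD []) v0 + pvChannelB ((PySem.List.pyGet? r 1).getD []) v1,
   (v0.length : Int) + (v1.length : Int))

-- ===== PRECONDITION & SPEC =====
-- Pre_ excludes exactly the inputs where Python A raises IndexError: v must have the
-- two channels, and r[k] is only demanded when v[k] is non-empty.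
def Pre_matchingPoint (r : List (List (Int × Int))) (v : List (List (Int × Int))) : Prop :=
  2 ≤ v.length ∧ (v.getD 0 [] ≠ [] → 1 ≤ r.length) ∧ (v.getD 1 [] ≠ [] → 2 ≤ r.length)
instance (r : List (List (Int × Int))) (v : List (List (Int × Int))) : Decidable (Pre_matchingPoint r v) := by unfold Pre_matchingPoint; infer_instance

def pvWitness_matchingPoint : (List (List (Int × Int))) × (List (List (Int × Int))) :=
  ([[(0, 0)], [(20, 20)]], [[(1, 1)], [(100, 100)]])

def Spec_matchingPoint (r : List (List (Int × Int))) (v : List (List (Int × Int))) (out : Int × Int) : Prop := out = matchingPoint_alt r v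
instance (r : List (List (Int × Int))) (v : List (List (Int × Int))) (out : Int × Int) : Decidable (Spec_matchingPoint r v out) := by unfold Spec_matchingPoint; infer_instance

-- ===== CLAIM (what is proved, stated in full; the proofs are below) =====
def Claim_equal_matchingPoint : Prop := ∀ (r : List (List (Int × Int))) (v : List (List (Int × Int))), Dom_matchingPoint r v → Pre_matchingPoint r v → Spec_matchingPoint r v (matchingPoint r v)

-- ===== LEMMAS AND PROOFS =====

-- grid membership: a point sits in bucket c of the grid iff it is an r-point with cell c
theorem pvGrid_mem_aux (rs : List (Int × Int)) (d : PySem.Dict (Int × Int) (List (Int × Int)))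
    (c j : Int × Int) :
    j ∈ (rs.foldl (fun g j => g.modify (pvCell j) [] (fun l => l ++ [j])) d).getD c []
      ↔ j ∈ d.getD c [] ∨ (j ∈ rs ∧ pvCell j = c) := by
  induction rs generalizing d with
  | nil => simp
  | cons x rest ih =>
      simp only [List.foldl_cons, ih, PySem.Dict.getD_modify, List.mem_cons]
      by_cases hc : c = pvCell x
      · subst hc; simp; tauto
      · simp [hc]
        constructor
        · tauto
        · rintro (h | ⟨(h | h), h2⟩)
          · tauto
          · exact absurd h2.symm (by subst h; exact hc)
          · tauto

theorem pvGrid_mem (rs : List (Int × Int)) (c j : Int × Int) :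
    j ∈ (pvGrid rs).getD c [] ↔ j ∈ rs ∧ pvCell j = c := by
  unfold pvGrid
  rw [pvGrid_mem_aux]
  simp [PySem.Dict.getD_empty]

theorem floordiv_le_floordiv {a b : Int} (h : a ≤ b) :
    PySem.Int.floordiv a 15 ≤ PySem.Int.floordiv b 15 := by
  rw [PySem.Int.floordiv_eq_ediv_of_pos (by norm_num), PySem.Int.floordiv_eq_ediv_of_pos (by norm_num)]
  exact Int.ediv_le_ediv (by norm_num) h

-- the grid probe finds a point iff some r-point lies in the box
theorem pvFound_eq_any (rs : List (Int × Int)) (p : Int × Int) :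
    pvFound (pvGrid rs) p = rs.any (pvInBox p) := by
  unfold pvFound
  rcases Bool.eq_false_or_eq_true (rs.any (pvInBox p)) with hany | hany
  · rw [hany]
    simp only [List.any_eq_true] at hany
    simp only [List.any_eq_true]
    obtain ⟨j, hj, hbox⟩ := hany
    have hb : p.1 - 15 ≤ j.1 ∧ j.1 ≤ p.1 + 14 ∧ p.2 - 15 ≤ j.2 ∧ j.2 ≤ p.2 + 14 := by
      simpa [pvInBox] using hbox
    refine ⟨PySem.Int.floordiv j.1 15, ?_, PySem.Int.floordiv j.2 15, ?_, j, ?_, hbox⟩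
    · rw [PySem.List.mem_pyRange_one]
      exact ⟨floordiv_le_floordiv hb.1, Int.lt_add_one_of_le (floordiv_le_floordiv hb.2.1)⟩
    · rw [PySem.List.mem_pyRange_one]
      exact ⟨floordiv_le_floordiv hb.2.2.1, Int.lt_add_one_of_le (floordiv_le_floordiv hb.2.2.2)⟩
    · exact (pvGrid_mem rs _ j).2 ⟨hj, rfl⟩
  · rw [hany]
    simp only [List.any_eq_false] at hany
    rw [← Bool.not_eq_true]
    intro hx
    simp only [List.any_eq_true] at hx
    obtain ⟨cx, _, cy, _, j, hj, hbox⟩ := hx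
    exact hany j ((pvGrid_mem rs (cx, cy) j).1 hj).1 hbox

-- A's inner break-loop is the same existence test
theorem pvInnerA_eq (i : Int × Int) (rs : List (Int × Int)) :
    pvInnerA i rs = if rs.any (pvInBox i) then 1 else 0 := by
  induction rs with
  | nil => simp [pvInnerA]
  | cons j rest ih =>
      by_cases h : pvInBox i j = true
      · have h' : (i.1 - 15 ≤ j.1 ∧ j.1 < i.1 + 15) ∧ (i.2 - 15 ≤ j.2 ∧ j.2 < i.2 + 15) := by
          simp [pvInBox] at h; omega
        simp only [pvInnerA, if_pos h', List.any_cons, h, Bool.true_or, if_pos]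
      · have h' : ¬ ((i.1 - 15 ≤ j.1 ∧ j.1 < i.1 + 15) ∧ (i.2 - 15 ≤ j.2 ∧ j.2 < i.2 + 15)) := by
          simp [pvInBox] at h; omega
        have hf : pvInBox i j = false := by simpa using h
        simp only [pvInnerA, if_neg h', List.any_cons, ih, hf, Bool.false_or]

theorem foldl_count_eq (f : Int × Int → Bool) (vs : List (Int × Int)) (m : Int) :
    vs.foldl (fun m p => if f p then m + 1 else m) m = m + (vs.countP f : Int) := by
  induction vs generalizing m with
  | nil => simp
  | cons p rest ih =>
      simp only [List.foldl_cons, List.countP_cons, ih]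
      by_cases h : f p = true
      · simp [h]; ring
      · simp [h]

theorem pvChannelB_eq (rs vs : List (Int × Int)) :
    pvChannelB rs vs = (vs.countP (pvFound (pvGrid rs)) : Int) := by
  unfold pvChannelB
  by_cases h : vs = []
  · simp [h]
  · simp only [h, if_false]
    rw [foldl_count_eq]
    ring

theorem pvLoopA_eq (rs vs : List (Int × Int)) (st : Int × Int) :
    pvLoopA rs st vs = (st.1 + (vs.countP (pvFound (pvGrid rs)) : Int), st.2 + (vs.length : Int)) := by
  induction vs generalizing st with
  | nil => simp [pvLoopA]
  | cons p rest ih =>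
      simp only [pvLoopA, List.foldl_cons, List.countP_cons, List.length_cons] at *
      rw [ih]
      have : pvInnerA p rs = if pvFound (pvGrid rs) p then 1 else 0 := by
        rw [pvInnerA_eq, pvFound_eq_any]
      rw [this]
      by_cases h : pvFound (pvGrid rs) p = true <;> simp [h, Prod.ext_iff] <;> omega

-- ===== VERDICT (by name: the statement is the Claim_ definition above) =====
theorem matchingPoint_spec : Claim_equal_matchingPoint := by
  intro r v _ _
  unfold Spec_matchingPoint matchingPoint matchingPoint_alt
  simp only [pvLoopA_eq, pvChannelB_eq]
  simp
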